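-- pv_equiv track=rewrite | github.com/matheuscordeiro/random-problems | Cracking the Coding Interview/Cap 17/17.18_shortest_supersequence.py | update_positions
-- ===== SOURCE A (Python) =====
-- def update_positions(array, value) -> list:
--     positions = [-1]*len(array)
--     last = -1
--     for i in range(len(array)-1, -1, -1):
--         if array[i] == value:
--             last = i
--         positions[i] = last
--
--     return positions
-- ===== SOURCE B (Python) =====
-- def update_positions(array, value) -> list:
--     occ = [i for i, x in enumerate(array) if x == value]
--     positions = [-1] * len(array)
--     j = 0
--     for i in range(len(array)):
--         while j < len(occ) and occ[j] < i:
--             j += 1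
--         positions[i] = occ[j] if j < len(occ) else -1
--     return positions
-- ===== Notes on version B (the rewrite author's own statement) =====
-- stated objective: alternative
-- what changed: B first builds the sorted list of occurrence indices of value, then fills positions in a forward sweep with a pointer into that list, instead of A's single backward pass carrying a running 'last'.
import Mathlib
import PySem

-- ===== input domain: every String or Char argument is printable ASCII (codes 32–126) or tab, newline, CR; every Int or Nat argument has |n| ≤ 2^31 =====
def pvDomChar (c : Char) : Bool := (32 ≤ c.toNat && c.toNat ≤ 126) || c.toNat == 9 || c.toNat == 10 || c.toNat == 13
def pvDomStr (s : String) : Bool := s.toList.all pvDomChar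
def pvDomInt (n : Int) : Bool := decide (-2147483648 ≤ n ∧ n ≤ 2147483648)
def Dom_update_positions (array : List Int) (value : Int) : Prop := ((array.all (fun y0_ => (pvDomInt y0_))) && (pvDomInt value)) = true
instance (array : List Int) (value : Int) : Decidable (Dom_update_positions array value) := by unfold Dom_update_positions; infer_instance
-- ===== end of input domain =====

-- B replaces A's single backward pass carrying a running 'last' by building the list of
-- occurrence indices first and then sweeping forward with a pointer into it (alternative
-- decomposition, same O(n) cost; return value only, neither version mutates its arguments).

-- ===== PORT A =====
-- backward loop: for i in range(len(array)-1, -1, -1), mutating positions and last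
def update_positions (array : List Int) (value : Int) : List Int :=
  let positions := List.replicate array.length (-1 : Int)
  let st := (PySem.List.pyRange ((array.length : Int) - 1) (-1) (-1)).foldl
    (fun (s : List Int × Int) i =>
      -- i is always a valid index, so the pyGetD default 0 is never used
      let last := if PySem.List.pyGetD array i 0 = value then i else s.2
      (PySem.List.pySetD s.1 i last, last))
    (positions, -1)
  st.1

-- ===== PORT B =====
-- the Python 'while j < len(occ) and occ[j] < i: j += 1' (j only grows, bounded by len(occ))
def altAdvance (occ : List Int) (i : Int) (j : Nat) : Nat :=
  if h : j < occ.length ∧ occ.getD j 0 < i then altAdvance occ i (j + 1) else j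
termination_by occ.length - j
decreasing_by omega

def update_positions_alt (array : List Int) (value : Int) : List Int :=
  let occ := ((PySem.List.enumerate array 0).filter (fun p => p.2 == value)).map (fun p => p.1)
  let positions := List.replicate array.length (-1 : Int)
  let st := (PySem.List.pyRange 0 (array.length : Int) 1).foldl
    (fun (s : List Int × Nat) i =>
      let j := altAdvance occ i s.2
      -- occ[j] is guarded by j < len(occ), so getD's default is never used
      (PySem.List.pySetD s.1 i (if j < occ.length then occ.getD j 0 else -1), j))
    (positions, 0)
  st.1

-- ===== PRECONDITION & SPEC =====
def Spec_update_positions (array : List Int) (value : Int) (out : List Int) : Prop := out = update_positions_alt array value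
instance (array : List Int) (value : Int) (out : List Int) : Decidable (Spec_update_positions array value out) := by unfold Spec_update_positions; infer_instance

-- ===== CLAIM (what is proved, stated in full; the proofs are below) =====
def Claim_equal_update_positions : Prop := ∀ (array : List Int) (value : Int), Dom_update_positions array value → Spec_update_positions array value (update_positions array value)

-- ===== LEMMAS AND PROOFS =====

-- reference value: nxList xs v base !! k = next index ≥ base+k (absolute) holding v, else -1
def nxList (xs : List Int) (v : Int) (base : Int) : List Int :=
  match xs with
  | [] => []
  | x :: xs' =>
    let rest := nxList xs' v (base + 1)
    (if x = v then base else rest.headD (-1)) :: rest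

-- reference occurrence list
def occList (xs : List Int) (v : Int) (base : Int) : List Int :=
  match xs with
  | [] => []
  | x :: xs' => (if x = v then [base] else []) ++ occList xs' v (base + 1)

theorem nxList_length (xs : List Int) (v base : Int) : (nxList xs v base).length = xs.length := by
  induction xs generalizing base with
  | nil => rfl
  | cons x xs ih => simp [nxList, ih]

theorem occList_ge (xs : List Int) (v base : Int) : ∀ o ∈ occList xs v base, base ≤ o := by
  induction xs generalizing base with
  | nil => simp [occList]
  | cons x xs ih =>
    intro o ho
    simp only [occList, List.mem_append] at ho
    rcases ho with ho | ho
    · split at ho <;> simp_all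
    · have := ih (base + 1) o ho; omega

theorem nxList_headD (xs : List Int) (v base : Int) :
    (nxList xs v base).headD (-1) = (occList xs v base).headD (-1) := by
  induction xs generalizing base with
  | nil => rfl
  | cons x xs ih =>
    by_cases hx : x = v
    · simp [nxList, occList, hx]
    · simpa [nxList, occList, hx, List.headD] using ih (base + 1)

theorem dropWhile_of_ge (l : List Int) (i : Int) (h : ∀ o ∈ l, i ≤ o) :
    l.dropWhile (fun o => decide (o < i)) = l := by
  cases l with
  | nil => rfl
  | cons x xs =>
    have : ¬ x < i := by have := h x (by simp); omega
    simp [List.dropWhile, this]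

theorem nxList_getD (v : Int) (k : Nat) (xs : List Int) (base : Int) :
    (nxList xs v base).getD k (-1)
      = ((occList xs v base).dropWhile (fun o => decide (o < base + (k : Int)))).headD (-1) := by
  induction k generalizing xs base with
  | zero =>
    rw [dropWhile_of_ge _ _ (by simpa using occList_ge xs v base)]
    cases xs with
    | nil => rfl
    | cons x xs' => simpa [List.getD] using nxList_headD (x :: xs') v base
  | succ k ih =>
    cases xs with
    | nil => rfl
    | cons x xs' =>
      have hrec : (nxList (x :: xs') v base).getD (k + 1) (-1)
          = (nxList xs' v (base + 1)).getD k (-1) := by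
        simp [nxList, List.getD]
      rw [hrec, ih xs' (base + 1)]
      have hb : base < base + ((k : Int) + 1) := by omega
      have harith : base + 1 + (k : Int) = base + ((k : Int) + 1) := by ring
      by_cases hx : x = v
      · simp [occList, hx, hb, harith]
      · simp [occList, hx, harith]

theorem nxList_getD_step (v : Int) (k : Nat) (xs : List Int) (base : Int) (hk : k < xs.length) :
    (nxList xs v base).getD k (-1)
      = if xs.getD k 0 = v then base + (k : Int) else (nxList xs v base).getD (k + 1) (-1) := by
  induction k generalizing xs base with
  | zero =>
    cases xs with
    | nil => simp at hk
    | cons x xs' =>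
      by_cases hx : x = v
      · simp [nxList, List.getD, hx]
      · cases h' : nxList xs' v (base + 1) with
        | nil => simp [nxList, List.getD, hx, h']
        | cons y ys => simp [nxList, List.getD, hx, h']
  | succ k ih =>
    cases xs with
    | nil => simp at hk
    | cons x xs' =>
      have e1 : (nxList (x :: xs') v base).getD (k + 1) (-1)
          = (nxList xs' v (base + 1)).getD k (-1) := rfl
      have e2 : (x :: xs').getD (k + 1) 0 = xs'.getD k 0 := rfl
      have e3 : (nxList (x :: xs') v base).getD (k + 1 + 1) (-1)
          = (nxList xs' v (base + 1)).getD (k + 1) (-1) := rfl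
      rw [e1, e2, e3, ih xs' (base + 1) (by simpa using hk)]
      have harith : base + 1 + (k : Int) = base + ((k : Int) + 1) := by ring
      rw [harith]
      norm_cast

-- ========== A side ==========

theorem headD_drop (l : List Int) (n : Nat) (d : Int) : (l.drop n).headD d = l.getD n d := by
  induction l generalizing n with
  | nil => simp [List.getD]
  | cons x xs ih =>
    cases n with
    | zero => simp [List.getD]
    | succ n => simpa [List.getD] using ih n

theorem A_loop (xs : List Int) (v : Int) (k : Nat) (hk : k ≤ xs.length)
    (ps : List Int) (last : Int) (hps : ps.length = xs.length)
    (hlast : last = (nxList xs v 0).getD k (-1)) :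
    ((PySem.List.pyRange ((k : Int) - 1) (-1) (-1)).foldl
      (fun (s : List Int × Int) i =>
        let last := if PySem.List.pyGetD xs i 0 = v then i else s.2
        (PySem.List.pySetD s.1 i last, last)) (ps, last)).1
    = (nxList xs v 0).take k ++ ps.drop k := by
  induction k generalizing ps last with
  | zero =>
    rw [PySem.List.pyRange_neg_one_eq_nil (by norm_num)]
    simp
  | succ k ih =>
    have hcons : PySem.List.pyRange (((k : Nat) + 1 : Int) - 1) (-1) (-1)
        = ((k : Nat) : Int) :: PySem.List.pyRange (((k : Nat) : Int) - 1) (-1) (-1) := by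
      have h1 : (((k : Nat) + 1 : Int) - 1) = ((k : Nat) : Int) := by ring
      rw [h1, PySem.List.pyRange_neg_one_cons (by omega)]
    have hklt : k < xs.length := by omega
    have hkm : k < (nxList xs v 0).length := by rw [nxList_length]; omega
    set m := nxList xs v 0 with hm
    have hstep : (if PySem.List.pyGetD xs ((k : Nat) : Int) 0 = v then ((k : Nat) : Int) else last)
        = m.getD k (-1) := by
      rw [PySem.List.pyGetD_natCast, hlast, hm, nxList_getD_step v k xs 0 hklt]
      split <;> simp
    push_cast [hcons, List.foldl_cons]
    rw [hstep]
    have hset : PySem.List.pySetD ps ((k : Nat) : Int) (m.getD k (-1)) = ps.set k (m.getD k (-1)) := by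
      simp
    rw [hset, ih (by omega) _ _ (by simp [hps]) rfl]
    have hkl : k < ps.length := by omega
    have hsplit : (ps.set k (m.getD k (-1))) = ps.take k ++ (m.getD k (-1)) :: ps.drop (k + 1) := by
      rw [List.set_eq_take_append_cons_drop]; simp [hkl]
    rw [hsplit]
    have htk : (ps.take k ++ (m.getD k (-1)) :: ps.drop (k + 1)).drop k = (m.getD k (-1)) :: ps.drop (k + 1) := by
      rw [List.drop_append_of_le_length (by simp [Nat.min_eq_left (le_of_lt hkl)])]
      simp [Nat.min_eq_left (le_of_lt hkl)]
    rw [htk]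
    rw [List.take_add_one]
    have : m[k]?.toList = [m.getD k (-1)] := by
      rw [List.getElem?_eq_getElem hkm, List.getD_eq_getElem m (-1) hkm]; rfl
    rw [this]
    simp

theorem A_eq_nx (xs : List Int) (v : Int) : update_positions xs v = nxList xs v 0 := by
  unfold update_positions
  have h := A_loop xs v xs.length (le_refl _) (List.replicate xs.length (-1 : Int)) (-1)
    (by simp)
    (by rw [List.getD_eq_default] ; rw [nxList_length])
  simp only at h
  rw [h]
  rw [List.take_of_length_le (by rw [nxList_length])]
  simp

-- ========== B side ==========

theorem occ_port (xs : List Int) (v base : Int) :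
    ((PySem.List.enumerate xs base).filter (fun p => p.2 == v)).map (fun p => p.1)
      = occList xs v base := by
  induction xs generalizing base with
  | nil => simp [PySem.List.enumerate_nil, occList]
  | cons x xs ih =>
    rw [PySem.List.enumerate_cons]
    by_cases hx : x = v
    · have hbe : (x == v) = true := by simp [hx]
      simp [List.filter, hbe, hx, occList, ih]
    · have hbe : (x == v) = false := by simp [hx]
      simp [List.filter, hbe, hx, occList, ih]

theorem altAdvance_le (occ : List Int) (i : Int) (j : Nat) (h : j ≤ occ.length) :
    altAdvance occ i j ≤ occ.length := by
  fun_induction altAdvance occ i j with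
  | case1 j h' ih => exact ih (by omega)
  | case2 j h' => exact h

theorem altAdvance_prefix (occ : List Int) (i : Int) (j : Nat)
    (h : ∀ t < j, occ.getD t 0 < i) : ∀ t < altAdvance occ i j, occ.getD t 0 < i := by
  fun_induction altAdvance occ i j with
  | case1 j h' ih =>
    apply ih
    intro t ht
    rcases Nat.lt_succ_iff_lt_or_eq.mp ht with h1 | h1
    · exact h t h1
    · subst h1; exact h'.2
  | case2 j h' => exact h

theorem altAdvance_stop (occ : List Int) (i : Int) (j : Nat) :
    ¬ (altAdvance occ i j < occ.length ∧ occ.getD (altAdvance occ i j) 0 < i) := by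
  fun_induction altAdvance occ i j with
  | case1 j h' ih => exact ih
  | case2 j h' => exact h'

theorem dropWhile_eq_drop (l : List Int) (i : Int) (j : Nat)
    (hpre : ∀ t < j, l.getD t 0 < i) (hstop : ¬ (j < l.length ∧ l.getD j 0 < i)) :
    l.dropWhile (fun o => decide (o < i)) = l.drop j := by
  induction l generalizing j with
  | nil => simp
  | cons x l' ih =>
    cases j with
    | zero =>
      have hx : ¬ x < i := by
        intro hlt; exact hstop ⟨by simp, by simpa [List.getD] using hlt⟩
      simp [List.dropWhile, hx]
    | succ j' =>
      have hx : x < i := by simpa [List.getD] using hpre 0 (Nat.succ_pos _)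
      have h1 : ∀ t < j', l'.getD t 0 < i := by
        intro t ht; simpa [List.getD] using hpre (t + 1) (by omega)
      have h2 : ¬ (j' < l'.length ∧ l'.getD j' 0 < i) := by
        intro ⟨ha, hb⟩; exact hstop ⟨by simpa using ha, by simpa [List.getD] using hb⟩
      simp [List.dropWhile, hx, ih j' h1 h2]

theorem B_loop (xs : List Int) (v : Int) (occ : List Int) (hocc : occ = occList xs v 0)
    (c : Nat) (i : Nat) (hc : i + c = xs.length)
    (ps : List Int) (j : Nat) (hps : ps.length = xs.length) (hj : j ≤ occ.length)
    (hpre : ∀ t < j, occ.getD t 0 < (i : Int)) :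
    ((PySem.List.pyRange (i : Int) (xs.length : Int) 1).foldl
      (fun (s : List Int × Nat) i =>
        let j := altAdvance occ i s.2
        (PySem.List.pySetD s.1 i (if j < occ.length then occ.getD j 0 else -1), j)) (ps, j)).1
    = ps.take i ++ (nxList xs v 0).drop i := by
  induction c generalizing i ps j with
  | zero =>
    rw [PySem.List.pyRange_one_eq_nil (by omega)]
    simp only [List.foldl_nil]
    have hi : i = xs.length := by omega
    rw [hi, List.take_of_length_le (le_of_eq hps), List.drop_of_length_le (le_of_eq (nxList_length xs v 0))]
    simp
  | succ c ih =>
    have hilt : i < xs.length := by omega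
    rw [PySem.List.pyRange_one_cons (by exact_mod_cast hilt), List.foldl_cons]
    simp only
    set j' := altAdvance occ (i : Int) j with hj'
    have hj'le : j' ≤ occ.length := altAdvance_le occ (i : Int) j hj
    have hj'pre : ∀ t < j', occ.getD t 0 < (i : Int) := altAdvance_prefix occ (i : Int) j hpre
    have hj'stop := altAdvance_stop occ (i : Int) j
    have hval : (if j' < occ.length then occ.getD j' 0 else -1) = (nxList xs v 0).getD i (-1) := by
      rw [nxList_getD v i xs 0, ← hocc]
      have h0 : (0 : Int) + (i : Int) = (i : Int) := by ring
      rw [h0]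
      have hdw : occ.dropWhile (fun o => decide (o < (i : Int))) = occ.drop j' :=
        dropWhile_eq_drop occ (i : Int) j' hj'pre hj'stop
      rw [hdw, headD_drop]
      by_cases hlt : j' < occ.length
      · rw [List.getD_eq_getElem occ 0 hlt, List.getD_eq_getElem occ (-1) hlt]
        simp [hlt]
      · rw [List.getD_eq_default occ (-1) (by omega)]
        simp [hlt]
    rw [hval]
    have hset : PySem.List.pySetD ps ((i : Nat) : Int) ((nxList xs v 0).getD i (-1))
        = ps.set i ((nxList xs v 0).getD i (-1)) := by simp
    rw [hset]
    have hpre' : ∀ t < j', occ.getD t 0 < ((i + 1 : Nat) : Int) := by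
      intro t ht; have := hj'pre t ht; push_cast; omega
    have harr : ((i : Int) + 1) = ((i + 1 : Nat) : Int) := by push_cast; ring
    rw [harr, ih (i + 1) (by omega) _ j' (by simp [hps]) hj'le hpre']
    set m := nxList xs v 0 with hm
    have him : i < m.length := by rw [hm, nxList_length]; omega
    have hipl : i < ps.length := by omega
    have hsplit : ps.set i (m.getD i (-1)) = ps.take i ++ (m.getD i (-1)) :: ps.drop (i + 1) := by
      rw [List.set_eq_take_append_cons_drop]; simp [hipl]
    have htake : (ps.set i (m.getD i (-1))).take (i + 1) = ps.take i ++ [m.getD i (-1)] := by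
      rw [hsplit]
      have hl : (ps.take i).length = i := by simp [Nat.min_eq_left (le_of_lt hipl)]
      rw [show i + 1 = (ps.take i).length + 1 by rw [hl], List.take_append]
      simp
    have hdropm : m.drop i = (m.getD i (-1)) :: m.drop (i + 1) := by
      rw [List.drop_eq_getElem_cons him, List.getD_eq_getElem m (-1) him]
    rw [htake, hdropm]
    simp

theorem B_eq_nx (xs : List Int) (v : Int) : update_positions_alt xs v = nxList xs v 0 := by
  unfold update_positions_alt
  simp only
  rw [occ_port xs v 0]
  have h := B_loop xs v (occList xs v 0) rfl xs.length 0 (by omega)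
    (List.replicate xs.length (-1 : Int)) 0 (by simp) (by omega) (by omega)
  simpa using h

-- ===== VERDICT (by name: the statement is the Claim_ definition above) =====
theorem update_positions_spec : Claim_equal_update_positions := by
  intro array value _
  unfold Spec_update_positions
  rw [A_eq_nx, B_eq_nx]
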